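-- pv_equiv track=rewrite | github.com/translatorswb/TWB-MT-fastapi | app/utils/tokenizers.py | tokenize_with_punkset
-- ===== SOURCE A (Python) =====
-- from typing import Callable, List
--
-- def tokenize_with_punkset(doc: str, punkset: List[str]) -> List[str]:
--     tokens = []
--     doc = ' '.join(doc.split())
--
--     curr_sent = ''
--     for c in doc:
--         if c in punkset:
--             curr_sent += c
--             if curr_sent:
--                 tokens.append(curr_sent.strip())
--                 curr_sent = ''
--         else:
--             curr_sent += c
--     if curr_sent:
--         tokens.append(curr_sent.strip())
--
--     return tokens
-- ===== SOURCE B (Python) =====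
-- from typing import List
--
-- def tokenize_with_punkset(doc: str, punkset: List[str]) -> List[str]:
--     doc = ' '.join(doc.split())
--     cuts = [i for i, c in enumerate(doc) if c in punkset]
--     tokens, start = [], 0
--     for i in cuts:
--         tokens.append(doc[start:i + 1].strip())
--         start = i + 1
--     if start < len(doc):
--         tokens.append(doc[start:].strip())
--     return tokens
-- ===== Notes on version B (the rewrite author's own statement) =====
-- stated objective: alternative
-- what changed: Replaces A's char-by-char accumulator state machine with an index-and-slice scheme: first collect all delimiter positions with one comprehension, then cut the normalized string into slices between consecutive delimiters (plus the trailing remainder) and strip each.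
import Mathlib
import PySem

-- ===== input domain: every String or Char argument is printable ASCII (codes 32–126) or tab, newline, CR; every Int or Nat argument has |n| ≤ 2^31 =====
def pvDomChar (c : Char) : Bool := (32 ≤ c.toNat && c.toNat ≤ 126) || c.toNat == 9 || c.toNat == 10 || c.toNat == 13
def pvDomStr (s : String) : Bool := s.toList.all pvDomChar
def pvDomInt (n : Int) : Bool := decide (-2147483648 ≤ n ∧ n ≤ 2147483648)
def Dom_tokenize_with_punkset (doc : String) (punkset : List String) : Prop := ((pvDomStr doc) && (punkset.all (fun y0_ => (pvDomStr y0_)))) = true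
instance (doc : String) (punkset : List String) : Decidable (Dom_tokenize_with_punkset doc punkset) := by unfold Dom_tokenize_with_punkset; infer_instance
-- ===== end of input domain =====

-- B replaces A's char-by-char accumulator loop by collecting delimiter indices and slicing
-- the normalized string between them (objective: alternative decomposition, same cost).


-- ===== PORT A =====
-- Python A: normalize with ' '.join(doc.split()); scan char by char keeping curr_sent,
-- flushing curr_sent.strip() whenever the char is in punkset, plus a final flush.
-- (Python strs curr_sent are represented as List Char; a token is String.ofList of that list.)
def pvStepA (punkset : List String) (st : List String × List Char) (c : Char) : List String × List Char :=
  if punkset.contains (String.ofList [c]) then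
    let cur2 := st.2 ++ [c]
    if cur2 ≠ [] then (st.1 ++ [PySem.Str.strip (String.ofList cur2)], ([] : List Char))
    else (st.1, cur2)
  else (st.1, st.2 ++ [c])

def tokenize_with_punkset (doc : String) (punkset : List String) : List String :=
  let d := (PySem.Str.join " " (PySem.Str.split₀ doc)).toList
  let st := d.foldl (pvStepA punkset) ([], [])
  if st.2 ≠ [] then st.1 ++ [PySem.Str.strip (String.ofList st.2)] else st.1

-- ===== PORT B =====
-- Python B: collect the indices of delimiter chars of the normalized doc, then cut the
-- string into slices doc[start:i+1] between consecutive delimiters, plus doc[start:].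
def pvStepB (d : List Char) (st : List String × Int) (i : Int) : List String × Int :=
  (st.1 ++ [PySem.Str.strip (String.ofList (PySem.List.slice d (some st.2) (some (i + 1))))], i + 1)

def tokenize_with_punkset_alt (doc : String) (punkset : List String) : List String :=
  let d := (PySem.Str.join " " (PySem.Str.split₀ doc)).toList
  let cuts := ((PySem.List.enumerate d).filter (fun p => punkset.contains (String.ofList [p.2]))).map (·.1)
  let st := cuts.foldl (pvStepB d) ([], 0)
  if st.2 < (d.length : Int) then st.1 ++ [PySem.Str.strip (String.ofList (PySem.List.slice d (some st.2) none))] else st.1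

-- ===== PRECONDITION & SPEC =====
def Spec_tokenize_with_punkset (doc : String) (punkset : List String) (out : List String) : Prop := out = tokenize_with_punkset_alt doc punkset
instance (doc : String) (punkset : List String) (out : List String) : Decidable (Spec_tokenize_with_punkset doc punkset out) := by unfold Spec_tokenize_with_punkset; infer_instance

-- ===== CLAIM (what is proved, stated in full; the proofs are below) =====
def Claim_equal_tokenize_with_punkset : Prop := ∀ (doc : String) (punkset : List String), Dom_tokenize_with_punkset doc punkset → Spec_tokenize_with_punkset doc punkset (tokenize_with_punkset doc punkset)

-- ===== LEMMAS AND PROOFS =====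

-- the cut-index list B computes for a suffix, with absolute start offset s
def pvCuts (punkset : List String) (l : List Char) (s : Int) : List Int :=
  ((PySem.List.enumerate l s).filter (fun p => punkset.contains (String.ofList [p.2]))).map (·.1)

theorem pvCuts_nil (punkset : List String) (s : Int) : pvCuts punkset [] s = [] := rfl

theorem pvCuts_cons (punkset : List String) (c : Char) (l : List Char) (s : Int) :
    pvCuts punkset (c :: l) s =
      if punkset.contains (String.ofList [c]) then s :: pvCuts punkset l (s + 1)
      else pvCuts punkset l (s + 1) := by
  simp only [pvCuts, PySem.List.enumerate_cons, List.filter_cons]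
  by_cases h : String.ofList [c] ∈ punkset <;> simp [h]

-- A's final flush / B's trailing-remainder step
def pvFinA (st : List String × List Char) : List String :=
  if st.2 ≠ [] then st.1 ++ [PySem.Str.strip (String.ofList st.2)] else st.1

def pvFinB (d : List Char) (st : List String × Int) : List String :=
  if st.2 < (d.length : Int) then st.1 ++ [PySem.Str.strip (String.ofList (PySem.List.slice d (some st.2) none))] else st.1

-- core invariant: with full.drop start = curr ++ rest (curr the pending segment),
-- A's remaining loop + flush equals B's remaining fold over the cuts of rest + trailing step
theorem pvCore (punkset : List String) (full : List Char) :
    ∀ (rest curr : List Char) (toks : List String) (start : Nat),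
      full.drop start = curr ++ rest →
      pvFinA (rest.foldl (pvStepA punkset) (toks, curr)) =
      pvFinB full ((pvCuts punkset rest ((start + curr.length : Nat) : Int)).foldl (pvStepB full) (toks, (start : Nat))) := by
  intro rest
  induction rest with
  | nil =>
    intro curr toks start h
    simp only [List.append_nil] at h
    simp only [List.foldl_nil, pvCuts_nil, pvFinA, pvFinB]
    have hlen : full.length - start = curr.length := by
      have := congrArg List.length h; simpa using this
    have hlt : ((start : Int) < (full.length : Int)) ↔ curr ≠ [] := by
      rcases Nat.lt_or_ge start full.length with hl | hg
      · constructor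
        · intro _ hc
          rw [hc] at hlen; simp at hlen; omega
        · intro _; exact_mod_cast hl
      · have : full.drop start = [] := List.drop_eq_nil_of_le hg
        rw [this] at h
        constructor
        · intro hc; exfalso; omega
        · intro hc; exact absurd h.symm (by simpa using hc)
    rw [PySem.List.slice_from_natCast, h]
    by_cases hc : curr = [] <;> simp [hc, hlt]
  | cons c rest ih =>
    intro curr toks start h
    rw [pvCuts_cons]
    by_cases hp : punkset.contains (String.ofList [c])
    · simp only [hp, if_pos]
      have hp' : String.ofList [c] ∈ punkset := by simpa using hp
      have hstep : pvStepA punkset (toks, curr) c =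
          (toks ++ [PySem.Str.strip (String.ofList (curr ++ [c]))], ([] : List Char)) := by
        simp [pvStepA, hp']
      rw [List.foldl_cons, hstep, List.foldl_cons]
      have hslice : PySem.List.slice full (some ((start : Nat) : Int))
            (some (((start + curr.length : Nat) : Int) + 1)) = curr ++ [c] := by
        have : (((start + curr.length : Nat) : Int) + 1) = ((start + curr.length + 1 : Nat) : Int) := by push_cast; ring
        rw [this, PySem.List.slice_natCast, h]
        have : start + curr.length + 1 - start = curr.length + 1 := by omega
        rw [this, show curr ++ c :: rest = (curr ++ [c]) ++ rest from by simp,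
           show curr.length + 1 = (curr ++ [c]).length from by simp, List.take_left]
      have hdrop : full.drop (start + curr.length + 1) = rest := by
        have h1 : full.drop (start + curr.length + 1) = (full.drop start).drop (curr.length + 1) := by
          rw [List.drop_drop, Nat.add_assoc]
        rw [h1, h]
        simp
      have hstepB : pvStepB full (toks, ((start : Nat) : Int)) ((start + curr.length : Nat) : Int) =
          (toks ++ [PySem.Str.strip (String.ofList (curr ++ [c]))], ((start + curr.length : Nat) : Int) + 1) := by
        simp only [pvStepB, hslice]
      rw [hstepB]
      have hcast : ((start + curr.length : Nat) : Int) + 1 = ((start + curr.length + 1 : Nat) : Int) := by push_cast; ring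
      have := ih [] (toks ++ [PySem.Str.strip (String.ofList (curr ++ [c]))]) (start + curr.length + 1) (by simpa using hdrop)
      simp only [List.length_nil, Nat.add_zero] at this
      rw [hcast]
      exact this
    · simp only [hp, if_neg, Bool.false_eq_true, not_false_iff]
      have hp' : String.ofList [c] ∉ punkset := by simpa using hp
      have hstep : pvStepA punkset (toks, curr) c = (toks, curr ++ [c]) := by
        simp [pvStepA, hp']
      rw [List.foldl_cons, hstep]
      have h2 : full.drop start = (curr ++ [c]) ++ rest := by
        rw [h]; simp
      have := ih (curr ++ [c]) toks start h2
      rw [this]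
      have : ((start + curr.length : Nat) : Int) + 1 = ((start + (curr ++ [c]).length : Nat) : Int) := by
        push_cast; simp; ring
      rw [this]

-- ===== VERDICT (by name: the statement is the Claim_ definition above) =====
theorem tokenize_with_punkset_spec : Claim_equal_tokenize_with_punkset := by
  intro doc punkset _
  unfold Spec_tokenize_with_punkset tokenize_with_punkset tokenize_with_punkset_alt
  have := pvCore punkset ((PySem.Str.join " " (PySem.Str.split₀ doc)).toList)
    ((PySem.Str.join " " (PySem.Str.split₀ doc)).toList) [] [] 0 (by simp)
  simpa [pvFinA, pvFinB, pvCuts] using this
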